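-- pv_equiv track=rewrite | github.com/AnimeshJaiswal11/leetcode-solutions | leet.py | tower_height
-- ===== SOURCE A (Python) =====
-- def tower_height(heights,k):
--     if len(heights) < 2:
--         return 0
--     mini = min(heights[0],heights[1])
--     maxi = max(heights[0],heights[1])
--     ans = abs(maxi-mini-2*k)
--     for i in range(2,len(heights)):
--         if heights[i] > maxi:
--             maxi = heights[i]
--             ans = max(abs(maxi-mini-2*k),ans)
--         if heights[i] < mini:
--             mini = heights[i]
--             ans = max(abs(maxi-mini-2*k),ans)
--     return ans
-- ===== SOURCE B (Python) =====
-- def tower_height(heights, k):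
--     # Closed form: the running difference maxi-mini in the scan is
--     # non-decreasing and |D-2k| is convex, so the max is at first or last D.
--     if len(heights) < 2:
--         return 0
--     d_init = abs(heights[0] - heights[1])
--     d_final = max(heights) - min(heights)
--     return max(abs(d_init - 2 * k), abs(d_final - 2 * k))
-- ===== Notes on version B (the rewrite author's own statement) =====
-- stated objective: simpler
-- what changed: Replaces the running min/max scan with update-on-extremes by a closed form: since the running difference max-min is non-decreasing and |D-2k| is convex, the answer is max(|abs(h0-h1)-2k|, |(max(heights)-min(heights))-2k|).
import Mathlib
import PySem

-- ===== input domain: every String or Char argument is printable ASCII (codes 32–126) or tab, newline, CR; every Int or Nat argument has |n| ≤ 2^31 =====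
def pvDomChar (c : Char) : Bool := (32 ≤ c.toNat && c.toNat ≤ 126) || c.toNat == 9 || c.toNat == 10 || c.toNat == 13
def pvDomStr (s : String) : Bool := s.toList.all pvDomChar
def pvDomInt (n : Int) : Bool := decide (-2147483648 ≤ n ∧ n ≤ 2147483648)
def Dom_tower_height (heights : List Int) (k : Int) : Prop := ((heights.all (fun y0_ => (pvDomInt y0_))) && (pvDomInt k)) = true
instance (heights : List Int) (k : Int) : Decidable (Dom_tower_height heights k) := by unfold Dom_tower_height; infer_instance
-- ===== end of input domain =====

-- B replaces A's running-min/max scan with a closed form: since the running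
-- difference is non-decreasing and |D-2k| is convex, the answer is
-- max(|d_init-2k|, |d_final-2k|) from the first pair and the global extremes.

-- Python's abs on ints
def pyAbs (x : Int) : Int := if x < 0 then -x else x

-- ===== PORT A =====
-- loop body of A: state (mini, maxi, ans), the two ifs in order
def towerStep (k : Int) (st : Int × Int × Int) (h : Int) : Int × Int × Int :=
  let mini := st.1
  let maxi := st.2.1
  let ans := st.2.2
  let p := if h > maxi then (h, max (pyAbs (h - mini - 2*k)) ans) else (maxi, ans)
  let q := if h < mini then (h, max (pyAbs (p.1 - h - 2*k)) p.2) else (mini, p.2)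
  (q.1, p.1, q.2)

def tower_height (heights : List Int) (k : Int) : Int :=
  match heights with
  | [] => 0
  | [_] => 0
  | a :: b :: rest =>
    let mini := min a b
    let maxi := max a b
    let ans := pyAbs (maxi - mini - 2*k)
    (rest.foldl (towerStep k) (mini, maxi, ans)).2.2

-- ===== PORT B =====
def tower_height_alt (heights : List Int) (k : Int) : Int :=
  match heights with
  | [] => 0
  | [_] => 0
  | a :: b :: rest =>
    let dInit := pyAbs (a - b)
    let dFinal := (b :: rest).foldl max a - (b :: rest).foldl min a
    max (pyAbs (dInit - 2*k)) (pyAbs (dFinal - 2*k))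

-- ===== PRECONDITION & SPEC =====
def Spec_tower_height (heights : List Int) (k : Int) (out : Int) : Prop := out = tower_height_alt heights k
instance (heights : List Int) (k : Int) (out : Int) : Decidable (Spec_tower_height heights k out) := by unfold Spec_tower_height; infer_instance

-- ===== CLAIM (what is proved, stated in full; the proofs are below) =====
def Claim_equal_tower_height : Prop := ∀ (heights : List Int) (k : Int), Dom_tower_height heights k → Spec_tower_height heights k (tower_height heights k)

-- ===== LEMMAS AND PROOFS =====

-- Invariant of A's loop: mini/maxi track running min/max, and ans is always
-- max(|dInit-2k|, |current D - 2k|), where dInit is the initial difference.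
lemma towerLoop_inv (k dInit : Int) (rest : List Int) :
    ∀ (mini maxi ans : Int), mini ≤ maxi → dInit ≤ maxi - mini →
    ans = max (pyAbs (dInit - 2*k)) (pyAbs (maxi - mini - 2*k)) →
    rest.foldl (towerStep k) (mini, maxi, ans) =
      (rest.foldl min mini, rest.foldl max maxi,
       max (pyAbs (dInit - 2*k)) (pyAbs (rest.foldl max maxi - rest.foldl min mini - 2*k))) := by
  induction rest with
  | nil =>
    intro mini maxi ans h1 h2 h3
    simpa [List.foldl] using h3
  | cons x rest ih =>
    intro mini maxi ans h1 h2 h3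
    simp only [List.foldl_cons]
    rcases lt_trichotomy maxi x with hx | hx | hx
    · -- x > maxi : maxi updates, mini cannot update
      have hstep : towerStep k (mini, maxi, ans) x
          = (mini, x, max (pyAbs (x - mini - 2*k)) ans) := by
        simp only [towerStep]; split_ifs <;> first | rfl | omega
      rw [hstep, ih mini x _ (by omega) (by omega) ?_,
          min_eq_left (by omega : mini ≤ x), max_eq_right (le_of_lt hx)]
      subst h3
      simp only [pyAbs, max_def]
      split_ifs <;> omega
    · -- x = maxi : nothing changes
      have hstep : towerStep k (mini, maxi, ans) x = (mini, maxi, ans) := by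
        simp only [towerStep]; split_ifs <;> first | rfl | omega
      rw [hstep, ih mini maxi ans h1 h2 h3,
          min_eq_left (by omega : mini ≤ x), max_eq_left (by omega : x ≤ maxi)]
    · -- x < maxi : maxi unchanged; mini may update
      rcases lt_or_ge x mini with hm | hm
      · have hstep : towerStep k (mini, maxi, ans) x
            = (x, maxi, max (pyAbs (maxi - x - 2*k)) ans) := by
          simp only [towerStep]; split_ifs <;> first | rfl | omega
        rw [hstep, ih x maxi _ (by omega) (by omega) ?_,
            min_eq_right (le_of_lt hm), max_eq_left (le_of_lt hx)]
        subst h3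
        simp only [pyAbs, max_def]
        split_ifs <;> omega
      · have hstep : towerStep k (mini, maxi, ans) x = (mini, maxi, ans) := by
          simp only [towerStep]; split_ifs <;> first | rfl | omega
        rw [hstep, ih mini maxi ans h1 h2 h3,
            min_eq_left hm, max_eq_left (le_of_lt hx)]

-- ===== VERDICT (by name: the statement is the Claim_ definition above) =====
theorem tower_height_spec : Claim_equal_tower_height := by
  intro heights k _
  unfold Spec_tower_height
  match heights with
  | [] => rfl
  | [_] => rfl
  | a :: b :: rest =>
    have habs : pyAbs (a - b) = max a b - min a b := by
      simp only [pyAbs, max_def, min_def]; split_ifs <;> omega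
    simp only [tower_height, tower_height_alt, List.foldl_cons]
    rw [towerLoop_inv k (max a b - min a b) rest (min a b) (max a b) _
        (by simp [max_def, min_def]; split_ifs <;> omega) (by omega) (by simp),
        habs]
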